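-- pv_equiv track=rewrite | github.com/jmccardle/McRogueFace | src/scripts/geometry.py | filled_circle
-- ===== SOURCE A (Python) =====
-- from typing import Optional, List, Tuple, Set
--
-- def filled_circle(
--     center: Tuple[int, int],
--     radius: int
-- ) -> List[Tuple[int, int]]:
--     """Generate all grid cells within a filled circle."""
--     if radius <= 0:
--         return [center]
--
--     cx, cy = center
--     cells = []
--     r_sq = radius * radius
--
--     for y in range(cy - radius, cy + radius + 1):
--         for x in range(cx - radius, cx + radius + 1):
--             if (x - cx) ** 2 + (y - cy) ** 2 <= r_sq:
--                 cells.append((x, y))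
--
--     return cells
-- ===== SOURCE B (Python) =====
-- import math
--
-- def filled_circle(center, radius):
--     """Vertical symmetry: compute each half-row x-extent once with math.isqrt,
--     build mirrored top/bottom row lists plus the middle row, then flatten."""
--     if radius <= 0:
--         return [center]
--     cx, cy = center
--     r_sq = radius * radius
--     top = []
--     bottom = []
--     for dy in range(1, radius + 1):
--         dx = math.isqrt(r_sq - dy * dy)
--         row = range(cx - dx, cx + dx + 1)
--         top.append([(x, cy - dy) for x in row])
--         bottom.append([(x, cy + dy) for x in row])
--     middle = [(x, cy) for x in range(cx - radius, cx + radius + 1)]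
--     cells = []
--     for row in reversed(top):
--         cells.extend(row)
--     cells.extend(middle)
--     for row in bottom:
--         cells.extend(row)
--     return cells
-- ===== Notes on version B (the rewrite author's own statement) =====
-- stated objective: alternative
-- what changed: Instead of testing the squared distance of every cell of the (2r+1)x(2r+1) bounding box, B uses the circle's vertical symmetry: one math.isqrt per half-row gives the exact x-extent, mirrored top/bottom row lists and the middle row are built in staged passes and then flattened.
import Mathlib
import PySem

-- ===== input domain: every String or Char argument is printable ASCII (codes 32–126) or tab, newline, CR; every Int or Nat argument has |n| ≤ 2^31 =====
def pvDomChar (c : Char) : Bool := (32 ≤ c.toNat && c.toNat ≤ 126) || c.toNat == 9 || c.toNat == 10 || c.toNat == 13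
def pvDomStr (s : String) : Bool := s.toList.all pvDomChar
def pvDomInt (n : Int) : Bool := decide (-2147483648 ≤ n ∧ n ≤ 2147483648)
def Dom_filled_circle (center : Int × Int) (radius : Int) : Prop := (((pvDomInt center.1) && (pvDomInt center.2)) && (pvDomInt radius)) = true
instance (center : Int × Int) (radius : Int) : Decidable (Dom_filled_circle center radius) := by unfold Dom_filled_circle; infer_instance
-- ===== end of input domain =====

-- B exploits the circle's vertical symmetry: one integer square root per half-row gives the
-- exact x-extent; mirrored top/bottom rows plus the middle row are built and then flattened.

-- ===== PORT A =====
def filled_circle (center : Int × Int) (radius : Int) : List (Int × Int) :=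
  if radius ≤ 0 then [center]
  else
    let cx := center.1
    let cy := center.2
    let r_sq := radius * radius
    (PySem.List.pyRange (cy - radius) (cy + radius + 1) 1).foldl (fun cells y =>
      (PySem.List.pyRange (cx - radius) (cx + radius + 1) 1).foldl (fun cells x =>
        if (x - cx) ^ 2 + (y - cy) ^ 2 ≤ r_sq then cells ++ [(x, y)] else cells) cells) []

-- ===== PORT B =====
-- math.isqrt (exact floor square root of a nonnegative int) is ported as Int.sqrt, which is exact there.
def filled_circle_alt (center : Int × Int) (radius : Int) : List (Int × Int) :=
  if radius ≤ 0 then [center]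
  else
    let cx := center.1
    let cy := center.2
    let r_sq := radius * radius
    let tb := (PySem.List.pyRange 1 (radius + 1) 1).foldl (fun tb dy =>
        let dx := Int.sqrt (r_sq - dy * dy)
        let row := PySem.List.pyRange (cx - dx) (cx + dx + 1) 1
        (tb.1 ++ [row.map (fun x => (x, cy - dy))],
         tb.2 ++ [row.map (fun x => (x, cy + dy))])) ([], [])
    let middle := (PySem.List.pyRange (cx - radius) (cx + radius + 1) 1).map (fun x => (x, cy))
    tb.1.reverse.flatten ++ middle ++ tb.2.flatten

-- ===== PRECONDITION & SPEC =====
def Spec_filled_circle (center : Int × Int) (radius : Int) (out : List (Int × Int)) : Prop := out = filled_circle_alt center radius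
instance (center : Int × Int) (radius : Int) (out : List (Int × Int)) : Decidable (Spec_filled_circle center radius out) := by unfold Spec_filled_circle; infer_instance

-- ===== CLAIM =====
def Claim_equal_filled_circle : Prop := ∀ (center : Int × Int) (radius : Int), Dom_filled_circle center radius → Spec_filled_circle center radius (filled_circle center radius)

-- ===== LEMMAS AND PROOFS =====

-- the row of cells at height y, as both programs ultimately produce it
def pvRow (cx cy r_sq : Int) (y : Int) : List (Int × Int) :=
  let dx := Int.sqrt (r_sq - (y - cy) * (y - cy))
  (PySem.List.pyRange (cx - dx) (cx + dx + 1) 1).map (fun x => (x, y))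

-- x*x ≤ k (0 ≤ k) exactly on the interval [-sqrt k, sqrt k]
theorem pv_sq_le_iff (k x : Int) (hk : 0 ≤ k) :
    x * x ≤ k ↔ -(Int.sqrt k) ≤ x ∧ x ≤ Int.sqrt k := by
  have hknat : ((k.toNat : Int)) = k := Int.toNat_of_nonneg hk
  have hs : Int.sqrt k = ((Nat.sqrt k.toNat : Nat) : Int) := rfl
  have h1 : Int.sqrt k * Int.sqrt k ≤ k := by
    rw [hs, ← hknat]; exact_mod_cast Nat.sqrt_le k.toNat
  have h2 : k < (Int.sqrt k + 1) * (Int.sqrt k + 1) := by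
    rw [hs, ← hknat]; exact_mod_cast Nat.lt_succ_sqrt k.toNat
  have hs0 : 0 ≤ Int.sqrt k := Int.sqrt_nonneg k
  constructor
  · intro h
    constructor
    · by_contra hc
      rw [Int.not_le] at hc
      have hx : x ≤ -(Int.sqrt k) - 1 := by omega
      nlinarith
    · by_contra hc
      rw [Int.not_le] at hc
      have hx : Int.sqrt k + 1 ≤ x := by omega
      nlinarith
  · rintro ⟨hl, hr⟩
    nlinarith

theorem pv_sqrt_le (m r : Int) (hm : 0 ≤ m) (hr : 0 ≤ r) (h : m ≤ r * r) : Int.sqrt m ≤ r := by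
  have h1 : Int.sqrt m * Int.sqrt m ≤ m := by
    have := (pv_sq_le_iff m (Int.sqrt m) hm).mpr ⟨by have := Int.sqrt_nonneg m; omega, le_refl _⟩
    exact this
  have hs0 : 0 ≤ Int.sqrt m := Int.sqrt_nonneg m
  by_contra hc
  rw [Int.not_le] at hc
  nlinarith

-- filter of an increasing range by an interval predicate is the sub-range
theorem pv_filter_interval (a b c d : Int) (hac : a ≤ c) (hcd : c ≤ d + 1) (hdb : d + 1 ≤ b) :
    (PySem.List.pyRange a b 1).filter (fun x => decide (c ≤ x ∧ x ≤ d)) =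
      PySem.List.pyRange c (d + 1) 1 := by
  rw [PySem.List.pyRange_one_append a c b hac (le_trans hcd hdb),
    PySem.List.pyRange_one_append c (d + 1) b hcd hdb, List.filter_append, List.filter_append]
  have hl : (PySem.List.pyRange a c 1).filter (fun x => decide (c ≤ x ∧ x ≤ d)) = [] := by
    simp only [List.filter_eq_nil_iff, PySem.List.mem_pyRange_one]
    intro x hx; simp only [decide_eq_true_eq]; omega
  have hm : (PySem.List.pyRange c (d + 1) 1).filter (fun x => decide (c ≤ x ∧ x ≤ d)) =
      PySem.List.pyRange c (d + 1) 1 := by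
    rw [List.filter_eq_self]
    intro x hx
    rw [PySem.List.mem_pyRange_one] at hx
    simp only [decide_eq_true_eq]; omega
  have hr : (PySem.List.pyRange (d + 1) b 1).filter (fun x => decide (c ≤ x ∧ x ≤ d)) = [] := by
    simp only [List.filter_eq_nil_iff, PySem.List.mem_pyRange_one]
    intro x hx; simp only [decide_eq_true_eq]; omega
  rw [hl, hm, hr, List.nil_append, List.append_nil]

-- shifting a unit range
theorem pv_pyRange_map_add (a b c : Int) :
    (PySem.List.pyRange a b 1).map (fun t => t + c) = PySem.List.pyRange (a + c) (b + c) 1 := by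
  rw [PySem.List.pyRange_one a b, PySem.List.pyRange_one (a + c) (b + c), List.map_map]
  have hn : (b + c - (a + c)).toNat = (b - a).toNat := by omega
  rw [hn]
  apply List.map_congr_left
  intro k _
  simp only [Function.comp]
  omega

-- reversing and negating a unit range
theorem pv_pyRange_rev_sub (a b c : Int) :
    (PySem.List.pyRange a b 1).reverse.map (fun t => c - t) =
      PySem.List.pyRange (c - b + 1) (c - a + 1) 1 := by
  have h := PySem.List.pyRange_neg_one_eq_reverse (b - 1) (a - 1)
  have h2 : PySem.List.pyRange (a - 1 + 1) (b - 1 + 1) 1 = PySem.List.pyRange a b 1 := by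
    norm_num
  rw [h2] at h
  rw [← h, PySem.List.pyRange_neg_one, PySem.List.pyRange_one, List.map_map]
  have hn : (c - a + 1 - (c - b + 1)).toNat = (b - 1 - (a - 1)).toNat := by omega
  rw [hn]
  apply List.map_congr_left
  intro k _
  simp only [Function.comp]
  omega

-- A's result is the concatenation of the per-height rows
theorem pv_A_flatMap (cx cy radius : Int) (hr : 0 < radius) :
    filled_circle (cx, cy) radius =
      (PySem.List.pyRange (cy - radius) (cy + radius + 1) 1).flatMap
        (pvRow cx cy (radius * radius)) := by
  unfold filled_circle
  rw [if_neg (by omega)]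
  dsimp only
  have hcong : ∀ (cells : List (Int × Int)) (y : Int),
      y ∈ PySem.List.pyRange (cy - radius) (cy + radius + 1) 1 →
      (PySem.List.pyRange (cx - radius) (cx + radius + 1) 1).foldl (fun cells x =>
        if (x - cx) ^ 2 + (y - cy) ^ 2 ≤ radius * radius then cells ++ [(x, y)] else cells) cells
        = cells ++ pvRow cx cy (radius * radius) y := by
    intro cells y hy
    rw [PySem.List.mem_pyRange_one] at hy
    rw [PySem.List.foldl_append_ite
      (p := fun x => (x - cx) ^ 2 + (y - cy) ^ 2 ≤ radius * radius) (f := fun x => (x, y))]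
    unfold pvRow
    dsimp only
    set dx := Int.sqrt (radius * radius - (y - cy) * (y - cy)) with hdx
    have hk : (0:Int) ≤ radius * radius - (y - cy) * (y - cy) := by nlinarith [hy.1, hy.2]
    have hdx0 : 0 ≤ dx := Int.sqrt_nonneg _
    have hdxr : dx ≤ radius := pv_sqrt_le _ radius hk (le_of_lt hr) (by nlinarith)
    congr 1
    have hfe : (PySem.List.pyRange (cx - radius) (cx + radius + 1) 1).filter
        (fun x => decide ((x - cx) ^ 2 + (y - cy) ^ 2 ≤ radius * radius)) =
        (PySem.List.pyRange (cx - radius) (cx + radius + 1) 1).filter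
        (fun x => decide (cx - dx ≤ x ∧ x ≤ cx + dx)) := by
      apply List.filter_congr
      intro x _
      rw [decide_eq_decide]
      have hiff := pv_sq_le_iff (radius * radius - (y - cy) * (y - cy)) (x - cx) hk
      rw [← hdx] at hiff
      constructor <;> intro h
      · have := hiff.mp (by nlinarith); omega
      · have := hiff.mpr ⟨by omega, by omega⟩; nlinarith
    rw [hfe, pv_filter_interval (cx - radius) (cx + radius + 1) (cx - dx) (cx + dx)
      (by omega) (by omega) (by omega)]
  rw [PySem.List.foldl_congr_mem _ _ (fun cells y => cells ++ pvRow cx cy (radius * radius) y) _ hcong,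
    PySem.List.foldl_append_eq_flatMap, List.nil_append]

-- B's result is the same concatenation
theorem pv_B_flatMap (cx cy radius : Int) (hr : 0 < radius) :
    filled_circle_alt (cx, cy) radius =
      (PySem.List.pyRange (cy - radius) (cy + radius + 1) 1).flatMap
        (pvRow cx cy (radius * radius)) := by
  unfold filled_circle_alt
  rw [if_neg (by omega)]
  dsimp only
  rw [PySem.List.foldl_prod_mk
    (f := fun acc dy => acc ++ [(PySem.List.pyRange
        (cx - Int.sqrt (radius * radius - dy * dy))
        (cx + Int.sqrt (radius * radius - dy * dy) + 1) 1).map (fun x => (x, cy - dy))])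
    (g := fun acc dy => acc ++ [(PySem.List.pyRange
        (cx - Int.sqrt (radius * radius - dy * dy))
        (cx + Int.sqrt (radius * radius - dy * dy) + 1) 1).map (fun x => (x, cy + dy))])]
  dsimp only
  rw [PySem.List.foldl_append_singleton_eq_map, PySem.List.foldl_append_singleton_eq_map]
  simp only [List.nil_append]
  -- each mirrored row is a pvRow
  have htop : ∀ dy : Int, (PySem.List.pyRange
      (cx - Int.sqrt (radius * radius - dy * dy))
      (cx + Int.sqrt (radius * radius - dy * dy) + 1) 1).map (fun x => (x, cy - dy))
      = pvRow cx cy (radius * radius) (cy - dy) := by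
    intro dy
    unfold pvRow
    have : (cy - dy - cy) * (cy - dy - cy) = dy * dy := by ring
    rw [this]
  have hbot : ∀ dy : Int, (PySem.List.pyRange
      (cx - Int.sqrt (radius * radius - dy * dy))
      (cx + Int.sqrt (radius * radius - dy * dy) + 1) 1).map (fun x => (x, cy + dy))
      = pvRow cx cy (radius * radius) (cy + dy) := by
    intro dy
    unfold pvRow
    have : (cy + dy - cy) * (cy + dy - cy) = dy * dy := by ring
    rw [this]
  have hmid : (PySem.List.pyRange (cx - radius) (cx + radius + 1) 1).map (fun x => (x, cy))
      = pvRow cx cy (radius * radius) cy := by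
    unfold pvRow
    have h0 : (cy - cy) * (cy - cy) = (0:Int) := by ring
    have hs : Int.sqrt (radius * radius - (cy - cy) * (cy - cy)) = radius := by
      rw [h0, sub_zero, Int.sqrt_eq]
      omega
    rw [hs]
  rw [List.map_congr_left (fun dy _ => htop dy), List.map_congr_left (fun dy _ => hbot dy)]
  -- flattenings of mapped lists are flatMaps over shifted ranges
  have htopf : (((PySem.List.pyRange 1 (radius + 1) 1).map
      (fun dy => pvRow cx cy (radius * radius) (cy - dy))).reverse).flatten
      = (PySem.List.pyRange (cy - radius) cy 1).flatMap (pvRow cx cy (radius * radius)) := by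
    rw [← List.map_reverse, ← List.flatMap_def]
    have := pv_pyRange_rev_sub 1 (radius + 1) cy
    have h2 : cy - (radius + 1) + 1 = cy - radius := by ring
    have h3 : cy - 1 + 1 = cy := by ring
    rw [h2, h3] at this
    rw [← this, List.flatMap_map]
  have hbotf : ((PySem.List.pyRange 1 (radius + 1) 1).map
      (fun dy => pvRow cx cy (radius * radius) (cy + dy))).flatten
      = (PySem.List.pyRange (cy + 1) (cy + radius + 1) 1).flatMap (pvRow cx cy (radius * radius)) := by
    rw [← List.flatMap_def]
    have := pv_pyRange_map_add 1 (radius + 1) cy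
    have h2 : 1 + cy = cy + 1 := by ring
    have h3 : radius + 1 + cy = cy + radius + 1 := by ring
    rw [h2, h3] at this
    rw [← this, List.flatMap_map]
    apply List.flatMap_congr   -- placeholder: functions already equal
    intro dy _
    dsimp only [Function.comp]
    rw [add_comm dy cy]
  rw [htopf, hmid, hbotf]
  -- stitch the three ranges together
  rw [PySem.List.pyRange_one_append (cy - radius) cy (cy + radius + 1) (by omega) (by omega),
    PySem.List.pyRange_one_append cy (cy + 1) (cy + radius + 1) (by omega) (by omega),
    List.flatMap_append, List.flatMap_append, PySem.List.pyRange_one_singleton,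
    List.flatMap_cons, List.flatMap_nil, List.append_nil, List.append_assoc]

-- ===== VERDICT =====
theorem filled_circle_spec : Claim_equal_filled_circle := by
  intro center radius _
  unfold Spec_filled_circle
  obtain ⟨cx, cy⟩ := center
  by_cases hr : radius ≤ 0
  · unfold filled_circle filled_circle_alt
    simp [hr]
  · rw [Int.not_le] at hr
    rw [pv_A_flatMap cx cy radius hr, pv_B_flatMap cx cy radius hr]
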